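-- pv_equiv track=rewrite | github.com/fiterV/N-grams | src/ngrams.py | get_ngrams_types_counts_for_n_minus1_grams
-- ===== SOURCE A (Python) =====
-- def get_ngrams_types_counts_for_n_minus1_grams(ngrams_freq_dict, n_minus1_grams_freq_dict, words):
--     """
--     Для кожної (N-1)-грами знаходимо кількість типів N-грам, які можна утворити для цієї (N-1)-грами
--     в даному корпусі
--     :param ngrams_freq_dict: частотний словник N-грам
--     :param n_minus1_grams_freq_dict: частотний словник (N-1)-грам
--     :param words: словник слів у корпусі
--     :return: словник у форматі: {(N-1)-грама: кількість типів N-грам, які можна утворити з даної (N-1)-грами в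
--     даному корпусі}
--     """
--     # словник t у форматі: {(N-1)-грама: кількість типів N-грам, які можна утворити з даної (N-1)-грами}
--     t = dict()
--     for i in n_minus1_grams_freq_dict.keys():
--         t[i] = 0
--     # Як утворюється N-грама: до кожної (N-1)-грами дописуємо почергово кожне слово зі словника слів
--     # Як рахувати кількість типів N-грам, які утворюються з даної (N-1)-грами:
--     # Якщо N-грама, утворена об'єднанням (N-1)-грами і певного слова зі словника слів,
--     # є в частотному словнику N-грам, тобто частота N-грами в корпусі більше нуля, то цей тип N-грами
--     # можна утворити з даної (N-1)-грами, і значення у словнику t збільшується на одиницю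
--     for first in n_minus1_grams_freq_dict.keys():  # для кожної (N-1)-грами
--         for second in words:  # для кожного слова в словнику слів
--             ngram = " ".join([first, second])  # об'єднання (N-1)-грами і слова зі словника слів у N-граму
--             count = ngrams_freq_dict.get(ngram, 0)  # Пошук даної N-грами в частотному словнику,
--             # якщо такої N-грами немає - повертається кількість нуль
--             if count > 0:  # якщо кількість більше нуля, тобто така N-грама існує в корпусі, то
--                 t[first] += 1  # збільшуємо кількість типів N-грам для цієї (N-1)-грами на одиницю
--     return t
-- ===== SOURCE B (Python) =====
-- def get_ngrams_types_counts_for_n_minus1_grams(ngrams_freq_dict, n_minus1_grams_freq_dict, words):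
--     # Inverted algorithm: instead of probing the N-gram dictionary with every
--     # (prefix, word) pair, build a multiplicity table of the word list once and
--     # make a single pass over the N-gram dictionary: each positively-counted
--     # N-gram is split at each of its spaces into (prefix, tail), and the prefix
--     # is credited with the multiplicity of the tail in the word list.
--     wc = {}
--     for w in words:
--         wc[w] = wc.get(w, 0) + 1
--     t = dict.fromkeys(n_minus1_grams_freq_dict, 0)
--     for g, c in ngrams_freq_dict.items():
--         if c > 0:
--             left, right = "", g
--             while right:
--                 ch, right = right[0], right[1:]
--                 if ch == " " and left in t:
--                     t[left] += wc.get(right, 0)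
--                 left += ch
--     return t
-- ===== Notes on version B (the rewrite author's own statement) =====
-- stated objective: faster
-- what changed: Instead of probing the N-gram dictionary with every (prefix, word) pair (O(|prefixes|*|words|) joins and lookups), B builds a word-multiplicity table once and makes a single pass over the N-gram dictionary, splitting each positive-count N-gram at each space and crediting the prefix with the multiplicity of the tail word.
import Mathlib
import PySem

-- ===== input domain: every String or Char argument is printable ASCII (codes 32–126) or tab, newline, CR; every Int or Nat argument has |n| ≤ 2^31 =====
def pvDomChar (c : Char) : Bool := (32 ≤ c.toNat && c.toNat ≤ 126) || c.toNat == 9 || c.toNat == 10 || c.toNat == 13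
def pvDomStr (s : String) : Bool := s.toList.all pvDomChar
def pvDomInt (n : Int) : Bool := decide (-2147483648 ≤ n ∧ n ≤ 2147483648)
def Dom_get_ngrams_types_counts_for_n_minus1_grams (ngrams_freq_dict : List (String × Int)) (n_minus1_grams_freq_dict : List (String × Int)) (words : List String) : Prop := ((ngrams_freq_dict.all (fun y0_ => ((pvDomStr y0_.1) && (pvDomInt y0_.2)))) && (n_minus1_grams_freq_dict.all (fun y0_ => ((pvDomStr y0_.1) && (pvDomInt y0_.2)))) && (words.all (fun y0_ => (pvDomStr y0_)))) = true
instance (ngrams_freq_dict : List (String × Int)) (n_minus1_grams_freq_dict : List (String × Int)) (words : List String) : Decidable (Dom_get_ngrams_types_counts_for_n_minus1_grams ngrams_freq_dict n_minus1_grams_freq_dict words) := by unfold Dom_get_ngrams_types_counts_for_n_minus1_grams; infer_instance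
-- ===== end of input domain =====

-- B replaces A's probe of the N-gram dictionary with every (prefix, word) pair by one pass over
-- the N-gram dictionary itself, splitting each positive N-gram at its spaces (objective: faster).

-- ===== PORT A =====
-- Literal transliteration of A: t[p] = 0 for every (N-1)-gram key, then for every (prefix, word)
-- pair join with " " and bump t[prefix] when the joined N-gram has a positive count.
-- (Python dict arguments become PySem.Dict.ofList of the association list.)
def get_ngrams_types_counts_for_n_minus1_grams (ngrams_freq_dict : List (String × Int)) (n_minus1_grams_freq_dict : List (String × Int)) (words : List String) : List (String × Int) :=
  let ngd := PySem.Dict.ofList ngrams_freq_dict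
  let n1d := PySem.Dict.ofList n_minus1_grams_freq_dict
  let t0 := n1d.keys.foldl (fun t i => t.insert i (0 : Int)) PySem.Dict.empty
  let t1 := n1d.keys.foldl (fun t first =>
      words.foldl (fun t second =>
        let ngram := PySem.Str.join " " [first, second]
        let count := ngd.getD ngram 0
        if count > 0 then t.modify first 0 (· + 1) else t) t) t0   -- t[first] += 1 (first is always a key of t)
  t1.items

-- ===== PORT B =====
-- Source B's inner while-loop: walk the characters of an N-gram; `left` = characters already consumed
-- (a Python str, kept here as List Char — String.ofList at the dict lookups is exact), `right` =
-- the remainder; at each space, credit prefix `left` with the multiplicity wc of the tail `right`.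
def pvScan (wc : PySem.Dict String Int) (t : PySem.Dict String Int) (left : List Char) (right : List Char) : PySem.Dict String Int :=
  match right with
  | [] => t
  | ch :: rest =>
      pvScan wc
        (if ch == ' ' && t.contains (String.ofList left) then
          t.modify (String.ofList left) 0 (· + wc.getD (String.ofList rest) 0)
        else t)
        (left ++ [ch]) rest

def get_ngrams_types_counts_for_n_minus1_grams_alt (ngrams_freq_dict : List (String × Int)) (n_minus1_grams_freq_dict : List (String × Int)) (words : List String) : List (String × Int) :=
  let wc := words.foldl (fun d w => d.insert w (d.getD w 0 + 1)) PySem.Dict.empty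
  let t0 := (PySem.Dict.ofList n_minus1_grams_freq_dict).keys.foldl (fun t p => t.insert p (0 : Int)) PySem.Dict.empty   -- dict.fromkeys(…, 0)
  let t1 := (PySem.Dict.ofList ngrams_freq_dict).items.foldl (fun t gc =>
      if gc.2 > 0 then pvScan wc t [] gc.1.toList else t) t0
  t1.items

-- ===== PRECONDITION & SPEC =====
def Spec_get_ngrams_types_counts_for_n_minus1_grams (ngrams_freq_dict : List (String × Int)) (n_minus1_grams_freq_dict : List (String × Int)) (words : List String) (out : List (String × Int)) : Prop := out = get_ngrams_types_counts_for_n_minus1_grams_alt ngrams_freq_dict n_minus1_grams_freq_dict words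
instance (ngrams_freq_dict : List (String × Int)) (n_minus1_grams_freq_dict : List (String × Int)) (words : List String) (out : List (String × Int)) : Decidable (Spec_get_ngrams_types_counts_for_n_minus1_grams ngrams_freq_dict n_minus1_grams_freq_dict words out) := by unfold Spec_get_ngrams_types_counts_for_n_minus1_grams; infer_instance

-- ===== CLAIM (what is proved, stated in full; the proofs are below) =====
def Claim_equal_get_ngrams_types_counts_for_n_minus1_grams : Prop := ∀ (ngrams_freq_dict : List (String × Int)) (n_minus1_grams_freq_dict : List (String × Int)) (words : List String), Dom_get_ngrams_types_counts_for_n_minus1_grams ngrams_freq_dict n_minus1_grams_freq_dict words → Spec_get_ngrams_types_counts_for_n_minus1_grams ngrams_freq_dict n_minus1_grams_freq_dict words (get_ngrams_types_counts_for_n_minus1_grams ngrams_freq_dict n_minus1_grams_freq_dict words)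

-- ===== LEMMAS AND PROOFS =====

-- the value pvScan accumulates at prefix p: one `val rest` per split of left++right
-- (at a space lying inside `right`) into p ++ ' ' :: rest
def pvTv (val : List Char → Int) (p : List Char) (left : List Char) (right : List Char) : Int :=
  match right with
  | [] => 0
  | ch :: rest =>
      (if ch = ' ' ∧ left = p then val rest else 0) + pvTv val p (left ++ [ch]) rest

theorem pvScan_keys (wc : PySem.Dict String Int) :
    ∀ (right left : List Char) (t : PySem.Dict String Int),
      (pvScan wc t left right).keys = t.keys := by
  intro right
  induction right with
  | nil => intro left t; rfl
  | cons ch rest ih =>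
      intro left t
      rw [pvScan, ih]
      by_cases hg : (ch == ' ' && t.contains (String.ofList left)) = true
      · simp only [hg, if_pos]
        rw [PySem.Dict.keys_modify,
          PySem.Dict.keys_insert_of_contains t _ (Bool.and_eq_true _ _ |>.mp hg).2]
      · simp [hg]

theorem pvScan_getD (wc : PySem.Dict String Int) :
    ∀ (right left : List Char) (t : PySem.Dict String Int) (p : String), p ∈ t.keys →
      (pvScan wc t left right).getD p 0 =
        t.getD p 0 + pvTv (fun v => wc.getD (String.ofList v) 0) p.toList left right := by
  intro right
  induction right with
  | nil => intro left t p _; simp [pvScan, pvTv]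
  | cons ch rest ih =>
      intro left t p hp
      rw [pvScan, pvTv]
      by_cases hg : (ch == ' ' && t.contains (String.ofList left)) = true
      · simp only [hg, if_pos]
        have hmem : p ∈ (t.modify (String.ofList left) 0 (· + wc.getD (String.ofList rest) 0)).keys := by
          rw [PySem.Dict.keys_modify,
            PySem.Dict.keys_insert_of_contains t _ (Bool.and_eq_true _ _ |>.mp hg).2]
          exact hp
        rw [ih _ _ _ hmem, PySem.Dict.getD_modify]
        by_cases hpl : p = String.ofList left
        · have hl : left = p.toList := by rw [hpl]; simp
          have hch : ch = ' ' := by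
            have := (Bool.and_eq_true _ _ |>.mp hg).1; simpa using this
          simp only [if_pos hpl, if_pos (And.intro hch hl)]
          rw [← hpl]
          ring
        · have hno : ¬ (ch = ' ' ∧ left = p.toList) := by
            rintro ⟨_, rfl⟩
            exact hpl (by simp)
          simp [hpl, hno]
      · simp only [hg, if_neg, Bool.not_eq_true]
        rw [ih _ _ _ hp]
        have hno : ¬ (ch = ' ' ∧ left = p.toList) := by
          rintro ⟨hch, rfl⟩
          have hc : t.contains p = true := (PySem.Dict.contains_iff_mem_keys t p).mpr hp
          simp [hch, hc] at hg
        simp [hno]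

theorem pvTv_zero (p : List Char) :
    ∀ (right left : List Char), pvTv (fun _ => (0 : Int)) p left right = 0 := by
  intro right
  induction right with
  | nil => intro left; rfl
  | cons ch rest ih => intro left; rw [pvTv, ih]; simp

theorem pvTv_add (f g : List Char → Int) (p : List Char) :
    ∀ (right left : List Char),
      pvTv (fun v => f v + g v) p left right = pvTv f p left right + pvTv g p left right := by
  intro right
  induction right with
  | nil => intro left; rfl
  | cons ch rest ih =>
      intro left
      rw [pvTv, pvTv, pvTv, ih]
      by_cases h : ch = ' ' ∧ left = p
      · rw [if_pos h, if_pos h, if_pos h]; ring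
      · rw [if_neg h, if_neg h, if_neg h]; ring

theorem pvTv_indicator (p w : List Char) :
    ∀ (right left : List Char),
      pvTv (fun v => if v = w then (1 : Int) else 0) p left right =
        if left ++ right = p ++ ' ' :: w ∧ left.length ≤ p.length then 1 else 0 := by
  intro right
  induction right with
  | nil =>
      intro left
      rw [pvTv]
      refine (if_neg ?_).symm
      rintro ⟨h, hle⟩
      have := congrArg List.length h
      simp at this
      omega
  | cons ch rest ih =>
      intro left
      rw [pvTv, ih]
      by_cases hfire : ch = ' ' ∧ left = p
      · obtain ⟨hch, hlp⟩ := hfire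
        subst hch; subst hlp
        have h2 : ¬ ((left ++ [' ']) ++ rest = left ++ ' ' :: w ∧ (left ++ [' ']).length ≤ left.length) := by
          rintro ⟨-, hle⟩
          simp at hle
        rw [if_neg h2, add_zero]
        by_cases hr : rest = w
        · subst hr; simp
        · have hcs : ¬ (left ++ ' ' :: rest = left ++ ' ' :: w ∧ left.length ≤ left.length) := by
            rintro ⟨h, -⟩
            exact hr (by simpa using h)
          rw [if_neg hr, if_neg hcs]
          simp
      · rw [if_neg hfire, zero_add]
        have hlcs : (left ++ [ch]) ++ rest = left ++ ch :: rest := by simp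
        rw [hlcs]
        refine if_congr ⟨?_, ?_⟩ rfl rfl
        · rintro ⟨hcs, hle⟩
          simp at hle
          exact ⟨hcs, by omega⟩
        · rintro ⟨hcs, hle⟩
          refine ⟨hcs, ?_⟩
          simp only [List.length_append, List.length_singleton]
          rcases Nat.lt_or_ge left.length p.length with h | h
          · omega
          · exfalso
            obtain ⟨h1, h2⟩ := List.append_inj hcs (le_antisymm hle h)
            have hch : ch = ' ' := by injection h2
            exact hfire ⟨hch, h1⟩

-- A's inner loop over `words` counts the words whose join with `first` is a positive N-gram
theorem pvA_inner (ngd : PySem.Dict String Int) (first : String) :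
    ∀ (ws : List String) (t : PySem.Dict String Int) (p : String),
      ((ws.foldl (fun t second =>
          if ngd.getD (PySem.Str.join " " [first, second]) 0 > 0 then t.modify first 0 (· + 1) else t) t)).getD p 0
        = t.getD p 0 +
          if p = first then ((ws.countP (fun w => decide (0 < ngd.getD (PySem.Str.join " " [first, w]) 0)) : Nat) : Int) else 0 := by
  intro ws
  induction ws with
  | nil => intro t p; by_cases hp : p = first <;> simp [hp]
  | cons w ws ih =>
      intro t p
      rw [List.foldl_cons, List.countP_cons]
      by_cases hc : ngd.getD (PySem.Str.join " " [first, w]) 0 > 0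
      · rw [if_pos hc, ih, PySem.Dict.getD_modify]
        by_cases hp : p = first
        · simp only [hp, if_pos, hc, decide_true]
          push_cast
          ring
        · simp [hp]
      · rw [if_neg hc, ih]
        by_cases hp : p = first
        · simp only [hp, if_pos]
          simp [hc]
        · simp [hp]

theorem pvA_inner_keys (ngd : PySem.Dict String Int) (first : String) :
    ∀ (ws : List String) (t : PySem.Dict String Int), first ∈ t.keys →
      ((ws.foldl (fun t second =>
          if ngd.getD (PySem.Str.join " " [first, second]) 0 > 0 then t.modify first 0 (· + 1) else t) t)).keys
        = t.keys := by
  intro ws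
  induction ws with
  | nil => intro t _; rfl
  | cons w ws ih =>
      intro t hf
      rw [List.foldl_cons]
      by_cases hc : ngd.getD (PySem.Str.join " " [first, w]) 0 > 0
      · rw [if_pos hc]
        have hk : (t.modify first 0 (· + 1)).keys = t.keys := by
          rw [PySem.Dict.keys_modify,
            PySem.Dict.keys_insert_of_contains t _ ((PySem.Dict.contains_iff_mem_keys t first).mpr hf)]
        rw [ih _ (by rw [hk]; exact hf), hk]
      · rw [if_neg hc, ih _ hf]

theorem pvA_outer (ngd : PySem.Dict String Int) (words : List String) :
    ∀ (ks : List String) (t : PySem.Dict String Int), (∀ k ∈ ks, k ∈ t.keys) →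
      (∀ p : String,
        ((ks.foldl (fun t first =>
            words.foldl (fun t second =>
              if ngd.getD (PySem.Str.join " " [first, second]) 0 > 0 then t.modify first 0 (· + 1) else t) t) t)).getD p 0
          = t.getD p 0 +
            ((ks.count p : Nat) : Int) * ((words.countP (fun w => decide (0 < ngd.getD (PySem.Str.join " " [p, w]) 0)) : Nat) : Int))
      ∧ ((ks.foldl (fun t first =>
            words.foldl (fun t second =>
              if ngd.getD (PySem.Str.join " " [first, second]) 0 > 0 then t.modify first 0 (· + 1) else t) t) t)).keys = t.keys := by
  intro ks
  induction ks with
  | nil => intro t _; exact ⟨fun p => by simp, rfl⟩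
  | cons k ks ih =>
      intro t hks
      have hkt : k ∈ t.keys := hks k List.mem_cons_self
      have hkeys1 : ((words.foldl (fun t second =>
          if ngd.getD (PySem.Str.join " " [k, second]) 0 > 0 then t.modify k 0 (· + 1) else t) t)).keys = t.keys :=
        pvA_inner_keys ngd k words t hkt
      have hks' : ∀ j ∈ ks, j ∈ ((words.foldl (fun t second =>
          if ngd.getD (PySem.Str.join " " [k, second]) 0 > 0 then t.modify k 0 (· + 1) else t) t)).keys := by
        rw [hkeys1]
        exact fun j hj => hks j (List.mem_cons_of_mem _ hj)
      obtain ⟨ihv, ihk⟩ := ih _ hks'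
      constructor
      · intro p
        rw [List.foldl_cons, ihv p, pvA_inner, List.count_cons]
        by_cases hp : p = k
        · subst hp
          simp only [BEq.rfl, if_pos]
          push_cast
          ring
        · have hbk : ¬ ((k == p) = true) := by simpa using fun h => hp h.symm
          simp only [if_neg hp, if_neg hbk]
          push_cast
          ring
      · rw [List.foldl_cons, ihk, hkeys1]

theorem pvT0_getD :
    ∀ (ks : List String) (t : PySem.Dict String Int) (p : String),
      ((ks.foldl (fun t k => t.insert k (0 : Int)) t)).getD p 0 =
        if p ∈ ks then 0 else t.getD p 0 := by
  intro ks
  induction ks with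
  | nil => intro t p; simp
  | cons k ks ih =>
      intro t p
      rw [List.foldl_cons, ih]
      by_cases hp : p ∈ ks
      · simp [hp]
      · by_cases hpk : p = k
        · simp [hpk]
        · simp [hp, hpk, PySem.Dict.getD_insert, List.mem_cons]

theorem pvB_items_keys (wc : PySem.Dict String Int) :
    ∀ (its : List (String × Int)) (t : PySem.Dict String Int),
      ((its.foldl (fun t gc => if gc.2 > 0 then pvScan wc t [] gc.1.toList else t) t)).keys = t.keys := by
  intro its
  induction its with
  | nil => intro t; rfl
  | cons gc its ih =>
      intro t
      rw [List.foldl_cons, ih]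
      by_cases hc : gc.2 > 0
      · rw [if_pos hc, pvScan_keys]
      · rw [if_neg hc]

theorem pvB_items (wc : PySem.Dict String Int) :
    ∀ (its : List (String × Int)) (t : PySem.Dict String Int) (p : String), p ∈ t.keys →
      ((its.foldl (fun t gc => if gc.2 > 0 then pvScan wc t [] gc.1.toList else t) t)).getD p 0
        = t.getD p 0 +
          (its.map (fun gc => if 0 < gc.2 then pvTv (fun v => wc.getD (String.ofList v) 0) p.toList [] gc.1.toList else 0)).sum := by
  intro its
  induction its with
  | nil => intro t p _; simp
  | cons gc its ih =>
      intro t p hp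
      rw [List.foldl_cons, List.map_cons, List.sum_cons]
      by_cases hc : gc.2 > 0
      · rw [if_pos hc, if_pos hc,
          ih _ _ (by rw [pvScan_keys]; exact hp),
          pvScan_getD wc _ _ _ _ hp]
        ring
      · rw [if_neg hc, if_neg hc, ih _ _ hp]
        ring

theorem pvJoin2 (p w : String) : (PySem.Str.join " " [p, w]).toList = p.toList ++ ' ' :: w.toList := by
  rw [PySem.Str.toList_join]
  simp [PySem.Chars.join_cons_cons, PySem.Chars.join_singleton]

-- a 0/1 sum over the items of a duplicate-free association list is the positivity of the lookup
theorem pvSum_ind (k : String) :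
    ∀ (l : List (String × Int)), (l.map Prod.fst).Nodup →
      (l.map (fun gc => if 0 < gc.2 ∧ gc.1 = k then (1 : Int) else 0)).sum =
        if 0 < (PySem.Dict.mk l).getD k 0 then 1 else 0 := by
  intro l
  induction l with
  | nil =>
      intro _
      have h0 : (PySem.Dict.mk ([] : List (String × Int))).getD k 0 = 0 := rfl
      simp [h0]
  | cons gc rest ih =>
      intro hnd
      obtain ⟨g, c⟩ := gc
      rw [List.map_cons] at hnd
      have hnd' : (rest.map Prod.fst).Nodup := (List.nodup_cons.mp hnd).2
      have hg : g ∉ rest.map Prod.fst := (List.nodup_cons.mp hnd).1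
      rw [List.map_cons, List.sum_cons, ih hnd']
      have hget : (PySem.Dict.mk ((g, c) :: rest)).getD k 0 =
          if g = k then c else (PySem.Dict.mk rest).getD k 0 := by
        rw [PySem.Dict.getD_eq_get?_getD, PySem.Dict.get?_mk_cons]
        by_cases h : g = k
        · simp [h]
        · have hbe : (g == k) = false := by simpa using h
          rw [hbe]
          simp [h, PySem.Dict.getD_eq_get?_getD]
      rw [hget]
      by_cases h : g = k
      · subst h
        have h0 : (PySem.Dict.mk rest).getD g 0 = 0 := by
          rw [PySem.Dict.getD_eq_get?_getD,
            (PySem.Dict.get?_eq_none_iff_not_mem_keys _ _).mpr (by simpa [PySem.Dict.keys_mk] using hg)]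
          rfl
        rw [h0]
        by_cases hc : 0 < c <;> simp [hc]
      · have hno : ¬ (0 < c ∧ g = k) := by rintro ⟨-, hgk⟩; exact h hgk
        simp [h]

-- the bridge: B's per-item split credits sum up to A's per-word probe count
theorem pvBridge (its : List (String × Int)) (hnd : (its.map Prod.fst).Nodup) (p : String) :
    ∀ (words : List String),
      (its.map (fun gc => if 0 < gc.2 then pvTv (fun v => ((List.count (String.ofList v) words : Nat) : Int)) p.toList [] gc.1.toList else 0)).sum
        = ((words.countP (fun w => decide (0 < (PySem.Dict.mk its).getD (PySem.Str.join " " [p, w]) 0)) : Nat) : Int) := by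
  intro words
  induction words with
  | nil =>
      simp only [List.count_nil, Nat.cast_zero, List.countP_nil]
      have h : ∀ gc ∈ its,
          (if 0 < gc.2 then pvTv (fun _ => (0 : Int)) p.toList [] gc.1.toList else 0) = 0 := by
        intro gc _
        rw [pvTv_zero]
        simp
      rw [List.map_congr_left (by intro gc hgc; exact h gc hgc)]
      simp
  | cons w ws ih =>
      have hcount : (fun v => ((List.count (String.ofList v) (w :: ws) : Nat) : Int)) =
          fun v => ((List.count (String.ofList v) ws : Nat) : Int) + (if v = w.toList then (1 : Int) else 0) := by
        funext v
        rw [List.count_cons]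
        by_cases hv : v = w.toList
        · subst hv
          simp
        · have hvw : ¬ (w = String.ofList v) := by
            intro h
            apply hv
            rw [h]
            simp
          simp [hv, hvw]
      have hsplit : ∀ gc ∈ its,
          (if 0 < gc.2 then pvTv (fun v => ((List.count (String.ofList v) (w :: ws) : Nat) : Int)) p.toList [] gc.1.toList else 0)
          = (if 0 < gc.2 then pvTv (fun v => ((List.count (String.ofList v) ws : Nat) : Int)) p.toList [] gc.1.toList else 0)
            + (if 0 < gc.2 ∧ gc.1 = PySem.Str.join " " [p, w] then (1 : Int) else 0) := by
        intro gc _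
        by_cases hc : 0 < gc.2
        · rw [if_pos hc, if_pos hc, hcount, pvTv_add, pvTv_indicator]
          congr 1
          refine if_congr ⟨?_, ?_⟩ rfl rfl
          · rintro ⟨h, -⟩
            refine ⟨hc, ?_⟩
            have h' : gc.1.toList = (PySem.Str.join " " [p, w]).toList := by
              rw [pvJoin2]
              simpa using h
            have := congrArg String.ofList h'
            simpa using this
          · rintro ⟨-, hj⟩
            rw [hj]
            simp [PySem.Chars.join_cons_cons, PySem.Chars.join_singleton]
        · simp [hc]
      rw [List.map_congr_left hsplit, PySem.List.sum_map_add_int, ih,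
        pvSum_ind (PySem.Str.join " " [p, w]) its hnd, List.countP_cons]
      by_cases hpos : 0 < (PySem.Dict.mk its).getD (PySem.Str.join " " [p, w]) 0
      · simp [hpos]
      · simp [hpos]

-- ===== VERDICT (by name: the statement is the Claim_ definition above) =====
theorem get_ngrams_types_counts_for_n_minus1_grams_spec : Claim_equal_get_ngrams_types_counts_for_n_minus1_grams := by
  intro ng n1 words _
  show (((PySem.Dict.ofList n1).keys.foldl (fun t first =>
      words.foldl (fun t second =>
        if (PySem.Dict.ofList ng).getD (PySem.Str.join " " [first, second]) 0 > 0 then t.modify first 0 (· + 1) else t) t)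
      ((PySem.Dict.ofList n1).keys.foldl (fun t i => t.insert i (0 : Int)) PySem.Dict.empty))).items
    = (((PySem.Dict.ofList ng).items.foldl (fun t gc =>
        if gc.2 > 0 then pvScan (words.foldl (fun d w => d.insert w (d.getD w 0 + 1)) PySem.Dict.empty) t [] gc.1.toList else t)
        ((PySem.Dict.ofList n1).keys.foldl (fun t p => t.insert p (0 : Int)) PySem.Dict.empty))).items
  have hndK : (PySem.Dict.ofList n1).keys.Nodup := PySem.Dict.nodup_keys_ofList n1
  have hkeys0 : (((PySem.Dict.ofList n1).keys.foldl (fun t i => t.insert i (0 : Int)) PySem.Dict.empty)).keys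
      = (PySem.Dict.ofList n1).keys := by
    rw [PySem.Dict.keys_foldl_insert (PySem.Dict.ofList n1).keys (fun _ _ => (0 : Int)) PySem.Dict.empty,
      PySem.Dict.keys_empty,
      PySem.Set.update_eq_append_of_disjoint ([] : PySem.Set String) (PySem.Dict.ofList n1).keys hndK
        (fun x _ hx => (List.not_mem_nil hx))]
    simp
  have hgetD0 : ∀ p ∈ (PySem.Dict.ofList n1).keys,
      (((PySem.Dict.ofList n1).keys.foldl (fun t i => t.insert i (0 : Int)) PySem.Dict.empty)).getD p 0 = 0 := by
    intro p hp
    rw [pvT0_getD, if_pos hp]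
  obtain ⟨hAv, hAk⟩ := pvA_outer (PySem.Dict.ofList ng) words (PySem.Dict.ofList n1).keys
      (((PySem.Dict.ofList n1).keys.foldl (fun t i => t.insert i (0 : Int)) PySem.Dict.empty))
      (fun k hk => by rw [hkeys0]; exact hk)
  have hBk := pvB_items_keys (words.foldl (fun d w => d.insert w (d.getD w 0 + 1)) PySem.Dict.empty)
      (PySem.Dict.ofList ng).items
      (((PySem.Dict.ofList n1).keys.foldl (fun t p => t.insert p (0 : Int)) PySem.Dict.empty))
  rw [PySem.Dict.items_eq_map_keys _ (by rw [hAk, hkeys0]; exact hndK) 0,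
    PySem.Dict.items_eq_map_keys _ (by rw [hBk, hkeys0]; exact hndK) 0,
    hAk, hBk, hkeys0]
  apply List.map_congr_left
  intro p hp
  -- A's value at p
  rw [hAv p, hgetD0 p hp, List.count_eq_one_of_mem hndK hp]
  -- B's value at p
  rw [pvB_items _ _ _ p (by rw [hkeys0]; exact hp), hgetD0 p hp]
  -- word counter = Counter(words)
  have hwc : (words.foldl (fun d w => d.insert w (d.getD w 0 + 1)) PySem.Dict.empty) = PySem.Dict.counter words :=
    PySem.Dict.foldl_insert_getD_add_one_eq_counter words
  have hwcv : (fun v => (words.foldl (fun d w => d.insert w (d.getD w 0 + 1)) PySem.Dict.empty).getD (String.ofList v) 0)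
      = fun v => ((List.count (String.ofList v) words : Nat) : Int) := by
    funext v
    rw [hwc, PySem.Dict.getD_counter]
  rw [hwcv]
  have hndI : ((PySem.Dict.ofList ng).items.map Prod.fst).Nodup := PySem.Dict.nodup_keys_ofList ng
  have hmk : PySem.Dict.mk (PySem.Dict.ofList ng).items = PySem.Dict.ofList ng := rfl
  rw [pvBridge (PySem.Dict.ofList ng).items hndI p words, hmk]
  push_cast
  ring_nf
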